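-- pv_equiv track=rewrite | github.com/MrBrantCode/unitest_baseline | mut_generate/mist_train_cf/cf_59909/solution.py | array_product
-- ===== SOURCE A (Python) =====
-- def array_product(arr):
--     all_product = 1
--     row_products = []
--
--     for sublist in arr:
--         if sublist:
--             row_product = 1
--             for elem in sublist:
--                 if elem != 0:
--                     row_product *= elem
--                     all_product *= elem
--             row_products.append(row_product)
--         else:
--             return "An empty sub-array was found in the array."
--
--     return all_product, row_products
-- ===== SOURCE B (Python) =====
-- def array_product(arr):
--     # Pass 1: validate and compute per-row products of nonzero elements.
--     row_products = []
--     for sub in arr: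
--         if not sub:
--             return "An empty sub-array was found in the array."
--         p = 1
--         for e in sub:
--             if e != 0:
--                 p *= e
--         row_products.append(p)
--     # Pass 2: overall product of nonzero elements in row-major order.
--     all_product = 1
--     for sub in arr:
--         for e in sub:
--             if e != 0:
--                 all_product *= e
--     return all_product, row_products
-- ===== Notes on version B (the rewrite author's own statement) =====
-- stated objective: alternative
-- what changed: A threads one interleaved accumulator pair through a single pass; B splits the work into two distinct passes: a validation/per-row-product pass, then a separate flat pass for the overall product.
import Mathlib
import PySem

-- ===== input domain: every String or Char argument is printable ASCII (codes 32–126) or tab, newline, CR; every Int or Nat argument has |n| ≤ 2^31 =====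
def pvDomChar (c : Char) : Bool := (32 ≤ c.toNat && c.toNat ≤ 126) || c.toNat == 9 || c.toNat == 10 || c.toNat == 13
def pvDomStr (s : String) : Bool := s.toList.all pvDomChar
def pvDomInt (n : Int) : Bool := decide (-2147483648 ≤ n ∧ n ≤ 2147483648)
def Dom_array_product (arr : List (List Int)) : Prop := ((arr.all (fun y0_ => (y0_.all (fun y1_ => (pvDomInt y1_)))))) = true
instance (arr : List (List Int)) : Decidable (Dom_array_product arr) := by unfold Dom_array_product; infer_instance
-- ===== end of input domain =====

-- B splits A's single interleaved pass into two passes (per-row products, then the overall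
-- product); equivalence of the return value on inputs with no empty sub-array.

-- ===== PORT A =====
-- A's single loop threads (all_product, row_products); an empty sublist returns a string,
-- which is outside the declared type: the helper returns none there (excluded by Pre_).
def aGo : List (List Int) → Int → List Int → Option (Int × List Int)
  | [], allP, rows => some (allP, rows)
  | sub :: rest, allP, rows =>
    if sub ≠ [] then
      -- inner loop: state (row_product, all_product)
      let st := sub.foldl (fun (s : Int × Int) e => if e ≠ 0 then (s.1 * e, s.2 * e) else s) (1, allP)
      aGo rest st.2 (rows ++ [st.1])
    else none

def array_product (arr : List (List Int)) : Int × List Int :=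
  (aGo arr 1 []).getD (1, [])

-- ===== PORT B =====
-- per-row product of nonzero elements (B's pass-1 inner loop)
def bRowProd (sub : List Int) : Int :=
  sub.foldl (fun p e => if e ≠ 0 then p * e else p) 1

-- B's pass 1: validate, collecting row products; none models the string return (outside Pre_)
def bRows : List (List Int) → Option (List Int)
  | [] => some []
  | sub :: rest =>
    if sub = [] then none
    else (bRows rest).map (fun rs => bRowProd sub :: rs)

-- B's pass 2: overall product of nonzero elements in row-major order
def bAll (arr : List (List Int)) : Int :=
  arr.foldl (fun a sub => sub.foldl (fun a e => if e ≠ 0 then a * e else a) a) 1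

def array_product_alt (arr : List (List Int)) : Int × List Int :=
  match bRows arr with
  | none => (1, [])              -- string return in Python; excluded by Pre_
  | some rows => (bAll arr, rows)

-- ===== PRECONDITION & SPEC =====
-- Pre_ excludes arrays containing an empty sub-array: there A returns an error STRING,
-- not a value of type Int × List Int (B returns the same string).
def Pre_array_product (arr : List (List Int)) : Prop := ∀ sub ∈ arr, sub ≠ []
instance (arr : List (List Int)) : Decidable (Pre_array_product arr) := by
  unfold Pre_array_product; infer_instance

def pvWitness_array_product : List (List Int) := [[2, 0, -3], [5]]

def Spec_array_product (arr : List (List Int)) (out : Int × List Int) : Prop := out = array_product_alt arr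
instance (arr : List (List Int)) (out : Int × List Int) : Decidable (Spec_array_product arr out) := by unfold Spec_array_product; infer_instance

-- ===== CLAIM (what is proved, stated in full; the proofs are below) =====
def Claim_equal_array_product : Prop := ∀ (arr : List (List Int)), Dom_array_product arr → Pre_array_product arr → Spec_array_product arr (array_product arr)

-- ===== LEMMAS AND PROOFS =====

-- A's paired inner fold is the two single folds run componentwise.
theorem pairFold (sub : List Int) (r a : Int) :
    sub.foldl (fun (s : Int × Int) e => if e ≠ 0 then (s.1 * e, s.2 * e) else s) (r, a)
      = (sub.foldl (fun p e => if e ≠ 0 then p * e else p) r,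
         sub.foldl (fun p e => if e ≠ 0 then p * e else p) a) := by
  induction sub generalizing r a with
  | nil => rfl
  | cons x xs ih =>
      simp only [List.foldl_cons]
      split_ifs <;> exact ih _ _

theorem aGo_eq (arr : List (List Int)) (allP : Int) (rows : List Int)
    (h : ∀ sub ∈ arr, sub ≠ []) :
    aGo arr allP rows =
      some (arr.foldl (fun a sub => sub.foldl (fun a e => if e ≠ 0 then a * e else a) a) allP,
            rows ++ arr.map bRowProd) := by
  induction arr generalizing allP rows with
  | nil => simp [aGo]
  | cons sub rest ih =>
      have hne : sub ≠ [] := h sub (by simp)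
      simp only [aGo, if_pos hne, pairFold]
      rw [ih _ _ (fun s hs => h s (by simp [hs]))]
      simp [bRowProd]

theorem bRows_eq (arr : List (List Int)) (h : ∀ sub ∈ arr, sub ≠ []) :
    bRows arr = some (arr.map bRowProd) := by
  induction arr with
  | nil => rfl
  | cons sub rest ih =>
      have hne : sub ≠ [] := h sub (by simp)
      simp [bRows, hne, ih (fun s hs => h s (by simp [hs]))]

-- ===== VERDICT (by name: the statement is the Claim_ definition above) =====
theorem array_product_spec : Claim_equal_array_product := by
  intro arr _ hpre
  unfold Spec_array_product array_product array_product_alt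
  rw [aGo_eq arr 1 [] hpre, bRows_eq arr hpre]
  simp [bAll]
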